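-- pv_equiv track=rewrite | github.com/yannleretaille/awg-openwrt-repos | scripts/build_opkg_repo.py | control_fields_to_stanza
-- ===== SOURCE A (Python) =====
-- from typing import Any, Dict, Iterable, List, Optional, Tuple
--
-- def control_fields_to_stanza(fields: Dict[str, str], filename: str, size: int, sha256: str) -> str:
--     priority = [
--         "Package",
--         "Version",
--         "Depends",
--         "Provides",
--         "Source",
--         "Section",
--         "Category",
--         "Submenu",
--         "Title",
--         "Maintainer",
--         "License",
--         "LicenseFiles",
--         "Architecture",
--         "Installed-Size",
--         "Description",
--     ]
--     lines: List[str] = []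
--
--     for key in priority:
--         if key in fields:
--             lines.append(f"{key}: {fields[key]}")
--     for key in sorted(k for k in fields if k not in set(priority)):
--         lines.append(f"{key}: {fields[key]}")
--
--     lines.append(f"Filename: {filename}")
--     lines.append(f"Size: {size}")
--     lines.append(f"SHA256sum: {sha256}")
--     return "\n".join(lines)
-- ===== SOURCE B (Python) =====
-- def control_fields_to_stanza(fields, filename, size, sha256):
--     priority = [
--         "Package",
--         "Version",
--         "Depends",
--         "Provides",
--         "Source",
--         "Section",
--         "Category",
--         "Submenu",
--         "Title",
--         "Maintainer",
--         "License",
--         "LicenseFiles",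
--         "Architecture",
--         "Installed-Size",
--         "Description",
--     ]
--     rank = {k: i for i, k in enumerate(priority)}
--     lines = [f"{k}: {fields[k]}"
--              for k in sorted(fields, key=lambda k: (rank.get(k, len(priority)), k))]
--     lines += [f"Filename: {filename}", f"Size: {size}", f"SHA256sum: {sha256}"]
--     return "\n".join(lines)
-- ===== Notes on version B (the rewrite author's own statement) =====
-- stated objective: idiomatic
-- what changed: A's two separate emission loops (fixed-order scan over the 15 priority keys with a membership test, then an alphabetical loop over the sorted leftovers) are replaced by one sorted pass over all field keys using a composite (rank, key) sort key, where rank is a dict built once from enumerate(priority).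
import Mathlib
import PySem

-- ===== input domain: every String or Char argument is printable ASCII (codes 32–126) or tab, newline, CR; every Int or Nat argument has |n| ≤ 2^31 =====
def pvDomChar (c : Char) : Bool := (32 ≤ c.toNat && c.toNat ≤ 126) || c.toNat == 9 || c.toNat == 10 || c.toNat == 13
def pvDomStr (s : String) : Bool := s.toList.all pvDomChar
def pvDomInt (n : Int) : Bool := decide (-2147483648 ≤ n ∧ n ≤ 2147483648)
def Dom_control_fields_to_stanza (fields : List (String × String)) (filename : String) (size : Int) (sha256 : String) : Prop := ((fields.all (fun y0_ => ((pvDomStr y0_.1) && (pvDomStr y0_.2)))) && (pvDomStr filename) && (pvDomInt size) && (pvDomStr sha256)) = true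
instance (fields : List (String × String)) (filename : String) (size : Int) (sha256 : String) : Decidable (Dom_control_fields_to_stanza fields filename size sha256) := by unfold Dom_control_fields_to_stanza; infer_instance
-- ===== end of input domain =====

-- B replaces A's two emission loops (fixed-order priority scan + alphabetical leftovers)
-- by a single sorted pass over all field keys with a composite (rank, key) sort key
-- built from a rank dictionary (more idiomatic; not claimed faster).


-- ===== PORT A =====
-- the `priority` literal both Pythons define verbatim
def pvPriority : List String :=
  ["Package", "Version", "Depends", "Provides", "Source", "Section", "Category",
   "Submenu", "Title", "Maintainer", "License", "LicenseFiles", "Architecture",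
   "Installed-Size", "Description"]

def control_fields_to_stanza (fields : List (String × String)) (filename : String) (size : Int) (sha256 : String) : String :=
  let d : PySem.Dict String String := PySem.Dict.mk fields
  -- for key in priority: if key in fields: lines.append(f"{key}: {fields[key]}")
  let lines : List String :=
    pvPriority.foldl (fun acc key => if d.contains key then acc ++ [key ++ ": " ++ d.getD key ""] else acc) []
  -- for key in sorted(k for k in fields if k not in set(priority)): lines.append(...)
  let others : List String :=
    PySem.List.sorted (d.keys.filter (fun k => !(PySem.Set.contains (PySem.Set.ofList pvPriority) k))) (fun x => x) false
  let lines := others.foldl (fun acc key => acc ++ [key ++ ": " ++ d.getD key ""]) lines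
  let lines := lines ++ ["Filename: " ++ filename]
  let lines := lines ++ ["Size: " ++ PySem.Int.toStr size]
  let lines := lines ++ ["SHA256sum: " ++ sha256]
  PySem.Str.join "\n" lines

-- ===== PORT B =====
def control_fields_to_stanza_alt (fields : List (String × String)) (filename : String) (size : Int) (sha256 : String) : String :=
  -- rank = {k: i for i, k in enumerate(priority)}
  let rank : PySem.Dict String Int :=
    (PySem.List.enumerate pvPriority).foldl (fun r p => r.insert p.2 p.1) PySem.Dict.empty
  let d : PySem.Dict String String := PySem.Dict.mk fields
  -- lines = [f"{k}: {fields[k]}" for k in sorted(fields, key=lambda k: (rank.get(k, len(priority)), k))]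
  let lines : List String :=
    (PySem.List.sorted2 d.keys (fun k => rank.getD k (pvPriority.length : Int)) (fun k => k) false).map
      (fun k => k ++ ": " ++ d.getD k "")
  let lines := lines ++ ["Filename: " ++ filename, "Size: " ++ PySem.Int.toStr size, "SHA256sum: " ++ sha256]
  PySem.Str.join "\n" lines

-- ===== PRECONDITION & SPEC =====
-- Pre_ excludes association lists with duplicate keys: a Python dict cannot contain them,
-- so the assoc-list encoding of `fields` is ambiguous there (first- vs last-match lookup).
def Pre_control_fields_to_stanza (fields : List (String × String)) (filename : String) (size : Int) (sha256 : String) : Prop :=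
  (fields.map Prod.fst).Nodup
instance (fields : List (String × String)) (filename : String) (size : Int) (sha256 : String) : Decidable (Pre_control_fields_to_stanza fields filename size sha256) := by unfold Pre_control_fields_to_stanza; infer_instance

def pvWitness_control_fields_to_stanza : (List (String × String)) × String × Int × String :=
  ([("Package", "awg"), ("Version", "1.0"), ("Zzz", "9")], "pkg.ipk", 3, "ab12")

def Spec_control_fields_to_stanza (fields : List (String × String)) (filename : String) (size : Int) (sha256 : String) (out : String) : Prop := out = control_fields_to_stanza_alt fields filename size sha256
instance (fields : List (String × String)) (filename : String) (size : Int) (sha256 : String) (out : String) : Decidable (Spec_control_fields_to_stanza fields filename size sha256 out) := by unfold Spec_control_fields_to_stanza; infer_instance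

-- ===== CLAIM (what is proved, stated in full; the proofs are below) =====
def Claim_equal_control_fields_to_stanza : Prop := ∀ (fields : List (String × String)) (filename : String) (size : Int) (sha256 : String), Dom_control_fields_to_stanza fields filename size sha256 → Pre_control_fields_to_stanza fields filename size sha256 → Spec_control_fields_to_stanza fields filename size sha256 (control_fields_to_stanza fields filename size sha256)

-- ===== LEMMAS AND PROOFS =====

-- B's rank dictionary, as a closed term (used only by the proofs)
def pvRank : PySem.Dict String Int :=
  (PySem.List.enumerate pvPriority).foldl (fun r p => r.insert p.2 p.1) PySem.Dict.empty

theorem pv_rank_lt : ∀ k ∈ pvPriority, pvRank.getD k (pvPriority.length : Int) < (pvPriority.length : Int) := by decide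
theorem pv_rank_pw : pvPriority.Pairwise (fun a b => pvRank.getD a (pvPriority.length : Int) < pvRank.getD b (pvPriority.length : Int)) := by decide
theorem pv_prio_nodup : pvPriority.Nodup := by decide
theorem pv_rank_keys : pvRank.keys = pvPriority := by decide
theorem pv_rank_none (k : String) (h : k ∉ pvPriority) : pvRank.getD k (pvPriority.length : Int) = (pvPriority.length : Int) := by
  apply PySem.Dict.getD_of_not_contains
  cases hc : pvRank.contains k with
  | false => rfl
  | true => exact absurd (pv_rank_keys ▸ (PySem.Dict.contains_iff_mem_keys pvRank k).1 hc) h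

theorem pv_sorted2_eq_sorted_lex {α : Type} (xs : List α) (k1 : α → Int) (k2 : α → String) :
    PySem.List.sorted2 xs k1 k2 false = PySem.List.sorted xs (fun x => (toLex (k1 x, k2 x) : Int ×ₗ String)) false := by
  have hbef : (fun a b => decide (k1 a < k1 b) || (!decide (k1 b < k1 a) && decide (k2 a < k2 b)))
      = (fun a b => decide ((toLex (k1 a, k2 a) : Int ×ₗ String) < toLex (k1 b, k2 b))) := by
    funext a b
    by_cases h1 : k1 a < k1 b
    · simp [Prod.Lex.lt_iff, h1]
    · by_cases h2 : k1 b < k1 a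
      · simp only [Prod.Lex.lt_iff]
        simp [h1, h2]
        intro h
        exact absurd h.symm (ne_of_lt h2)
      · have he : k1 a = k1 b := le_antisymm (not_lt.1 h2) (not_lt.1 h1)
        simp [Prod.Lex.lt_iff, he]
  rw [PySem.List.sorted_eq_foldl_insertBy]
  show xs.foldl (fun acc x => PySem.List.insertBy (fun a b => decide (k1 a < k1 b) || (!decide (k1 b < k1 a) && decide (k2 a < k2 b))) x acc) [] = _
  rw [hbef]

theorem pv_main (fields : List (String × String)) (h : (fields.map Prod.fst).Nodup) :
    PySem.List.sorted2 (PySem.Dict.mk fields : PySem.Dict String String).keys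
        (fun k => pvRank.getD k (pvPriority.length : Int)) (fun k => k) false
      = pvPriority.filter (fun k => (PySem.Dict.mk fields : PySem.Dict String String).contains k)
        ++ PySem.List.sorted
             ((PySem.Dict.mk fields : PySem.Dict String String).keys.filter
               (fun k => !(PySem.Set.contains (PySem.Set.ofList pvPriority) k))) (fun x => x) false := by
  set keys := (PySem.Dict.mk fields : PySem.Dict String String).keys with hkeys
  have hnd : keys.Nodup := h
  have hset : (fun k => !(PySem.Set.contains (PySem.Set.ofList pvPriority) k))
      = (fun k : String => !decide (k ∈ pvPriority)) := by
    funext k; simp [pysem]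
  have hcont : ∀ k, (PySem.Dict.mk fields : PySem.Dict String String).contains k = true ↔ k ∈ keys := by
    intro k; exact PySem.Dict.contains_iff_mem_keys _ k
  set others := keys.filter (fun k => !(PySem.Set.contains (PySem.Set.ofList pvPriority) k)) with hoth
  have hothnd : others.Nodup := hnd.filter _
  have hothmem : ∀ k, k ∈ others ↔ k ∈ keys ∧ k ∉ pvPriority := by
    intro k; rw [hoth, hset]; simp
  set s := PySem.List.sorted others (fun x => x) false with hs
  have hsperm : s.Perm others := PySem.List.sorted_perm others (fun x => x) false
  have hsnd : s.Nodup := hsperm.nodup_iff.2 hothnd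
  have hsmem : ∀ k, k ∈ s ↔ k ∈ keys ∧ k ∉ pvPriority := by
    intro k; rw [hsperm.mem_iff]; exact hothmem k
  set pri := pvPriority.filter (fun k => (PySem.Dict.mk fields : PySem.Dict String String).contains k) with hpri
  have hprimem : ∀ k, k ∈ pri ↔ k ∈ pvPriority ∧ k ∈ keys := by
    intro k; rw [hpri]; simp only [List.mem_filter]; rw [hcont k]
  -- permutation
  have hperm : (pri ++ s).Perm keys := by
    have h1 : pri.Perm (keys.filter (fun k => decide (k ∈ pvPriority))) := by
      rw [List.perm_ext_iff_of_nodup (pv_prio_nodup.filter _) (hnd.filter _)]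
      intro a
      rw [hprimem a]; simp [and_comm]
    have h2 : (pri ++ s).Perm (keys.filter (fun k => decide (k ∈ pvPriority)) ++ others) :=
      h1.append (hsperm)
    refine h2.trans ?_
    have := List.filter_append_perm (fun k : String => decide (k ∈ pvPriority)) keys
    rw [hoth, hset]
    exact this
  -- pairwise
  have key_lt : ∀ a b : String, pvRank.getD a (pvPriority.length : Int) < pvRank.getD b (pvPriority.length : Int) →
      (toLex (pvRank.getD a (pvPriority.length : Int), a) : Int ×ₗ String) < toLex (pvRank.getD b (pvPriority.length : Int), b) := by
    intro a b hab; exact Prod.Lex.lt_iff.2 (Or.inl hab)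
  have key_lt2 : ∀ a b : String, a ∉ pvPriority → b ∉ pvPriority → a < b →
      (toLex (pvRank.getD a (pvPriority.length : Int), a) : Int ×ₗ String) < toLex (pvRank.getD b (pvPriority.length : Int), b) := by
    intro a b ha hb hab
    exact Prod.Lex.lt_iff.2 (Or.inr ⟨by simp [pv_rank_none a ha, pv_rank_none b hb], hab⟩)
  have hpw : (pri ++ s).Pairwise (fun a b =>
      (toLex (pvRank.getD a (pvPriority.length : Int), a) : Int ×ₗ String) < toLex (pvRank.getD b (pvPriority.length : Int), b)) := by
    rw [List.pairwise_append]
    refine ⟨?_, ?_, ?_⟩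
    · exact (pv_rank_pw.filter _).imp (fun hab => key_lt _ _ hab)
    · have hle : s.Pairwise (fun a b : String => a ≤ b) := PySem.List.sorted_pairwise others (fun x => x)
      have hlt : s.Pairwise (fun a b : String => a < b) :=
        (hle.and hsnd).imp (fun hab => lt_of_le_of_ne hab.1 hab.2)
      exact hlt.imp_of_mem (fun ha hb hab =>
        key_lt2 _ _ ((hsmem _).1 ha).2 ((hsmem _).1 hb).2 hab)
    · intro a ha b hb
      have ha' : a ∈ pvPriority := ((hprimem a).1 ha).1
      have hb' : b ∉ pvPriority := ((hsmem b).1 hb).2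
      apply key_lt
      rw [pv_rank_none b hb']
      exact pv_rank_lt a ha'
  rw [pv_sorted2_eq_sorted_lex]
  exact PySem.List.sorted_eq_of_perm_of_pairwise_lt keys (pri ++ s) _ hperm hpw

-- ===== VERDICT (by name: the statement is the Claim_ definition above) =====
theorem control_fields_to_stanza_spec : Claim_equal_control_fields_to_stanza := by
  intro fields filename size sha256 _hdom hpre
  unfold Spec_control_fields_to_stanza control_fields_to_stanza control_fields_to_stanza_alt
  simp only [PySem.List.foldl_append_if, PySem.List.foldl_append_singleton_eq_map,
    List.nil_append, List.append_assoc]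
  rw [← pvRank, pv_main fields hpre]
  have hc : ({ items := fields } : PySem.Dict String String).contains = fun k => fields.any fun p => p.1 == k := rfl
  rw [hc]
  simp [List.map_append, List.append_assoc]
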